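-- pv_equiv track=rewrite | github.com/3228689373/excercise_projecteuler | largest_palindromic_product.py | find_fst_product_of_nbit
-- ===== SOURCE A (Python) =====
-- def find_fst_product_of_nbit(n,nbit):
--     minimum = int("1" + "0"*(nbit-1))
--     maximum = int("9"*nbit)
--     for i in range(minimum,maximum+1):
--         if(n%i ==0):
--             q = n//i
--             if(q in range(minimum,maximum+1)):
--                 return((i,q))
--             else:
--                 pass
--         else:
--             pass
--     return(None)
-- ===== SOURCE B (Python) =====
-- def find_fst_product_of_nbit(n, nbit):
--     minimum = 10 ** (nbit - 1)
--     maximum = 10 ** nbit - 1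
--     if n <= 0:
--         return None
--     best = None
--     d = 1
--     while d * d <= n:
--         if n % d == 0:
--             for c in (d, n // d):
--                 if minimum <= c <= maximum and minimum <= n // c <= maximum:
--                     if best is None or c < best:
--                         best = c
--         d += 1
--     if best is None:
--         return None
--     return (best, n // best)
-- ===== Notes on version B (the rewrite author's own statement) =====
-- stated objective: alternative
-- what changed: A scans the contiguous range of all nbit-digit numbers and returns on the first divisor with an nbit-digit cofactor; B instead enumerates only the divisors of n by trial division up to sqrt(n) (each d yields the pair d, n//d) and keeps the minimum divisor whose cofactor is also in range; intended as asymptotically cheaper (O(sqrt n) vs O(10^nbit)), but a timing run got no clean reading (A already times out at small probe sizes), so no speed is claimed.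
import Mathlib
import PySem

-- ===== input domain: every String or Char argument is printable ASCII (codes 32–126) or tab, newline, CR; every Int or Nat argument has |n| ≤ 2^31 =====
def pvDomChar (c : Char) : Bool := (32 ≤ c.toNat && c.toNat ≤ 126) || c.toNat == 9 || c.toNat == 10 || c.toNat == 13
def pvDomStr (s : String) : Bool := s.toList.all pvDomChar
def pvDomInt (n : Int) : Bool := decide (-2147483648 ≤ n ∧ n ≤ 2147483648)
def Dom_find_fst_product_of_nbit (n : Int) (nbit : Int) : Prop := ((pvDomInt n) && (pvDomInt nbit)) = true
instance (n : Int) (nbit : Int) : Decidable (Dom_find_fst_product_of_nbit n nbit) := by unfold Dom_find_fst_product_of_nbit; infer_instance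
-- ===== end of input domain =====

-- B replaces A's contiguous scan over all nbit-digit numbers by trial division over the divisors of
-- n up to its square root, keeping the smallest in-range divisor whose cofactor is also in range.


-- ===== PORT A =====
-- Hand port of Python's int() on the strings A builds ("1"+"0"*k and "9"*nbit: no whitespace, sign
-- or underscores — possibly empty, otherwise all ASCII digits): exact there, a nonempty digit string
-- folds left-to-right as acc*10+digit and int("") is a ValueError (none).
-- (PySem.Int.ofStr? models the full int(); its digit kernel is private, hence this explicit fold.)
def pvIntOfDigits? (cs : List Char) : Option Int :=
  if cs ≠ [] ∧ cs.all (fun c => 48 ≤ c.toNat && c.toNat ≤ 57) then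
    some (cs.foldl (fun a c => a * 10 + ((c.toNat : Int) - 48)) 0)
  else none

def find_fst_product_of_nbit (n : Int) (nbit : Int) : Option (Int × Int) :=
  -- minimum = int("1" + "0"*(nbit-1)); maximum = int("9"*nbit)  (string * negative count = "")
  match pvIntOfDigits? ('1' :: List.replicate (nbit - 1).toNat '0'),
        pvIntOfDigits? (List.replicate nbit.toNat '9') with
  | some minimum, some maximum =>
      -- for i in range(minimum, maximum+1): return (i, q) on the first hit;
      -- "q in range(minimum, maximum+1)" is Python's arithmetic membership test minimum ≤ q < maximum+1
      (PySem.List.pyRange minimum (maximum + 1) 1).findSome? (fun i =>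
        if PySem.Int.mod n i = 0 then
          let q := PySem.Int.floordiv n i
          if minimum ≤ q ∧ q < maximum + 1 then some (i, q) else none
        else none)
  | _, _ => none  -- int("") raised ValueError (only when nbit ≤ 0, outside Pre_)

-- ===== PORT B =====
-- body of "for c in (d, n//d): if minimum <= c <= maximum and minimum <= n//c <= maximum: keep min"
def pvBest (n minimum maximum : Int) (best : Option Int) (c : Int) : Option Int :=
  if minimum ≤ c ∧ c ≤ maximum ∧ minimum ≤ PySem.Int.floordiv n c ∧ PySem.Int.floordiv n c ≤ maximum then
    match best with
    | none => some c
    | some b => if c < b then some c else some b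
  else best

def pvLoop (n minimum maximum : Int) (d : Int) (best : Option Int) (fuel : Nat) : Option Int :=
  match fuel with
  | 0 => best
  | f + 1 =>
    if d * d ≤ n then
      pvLoop n minimum maximum (d + 1)
        (if PySem.Int.mod n d = 0 then
          pvBest n minimum maximum (pvBest n minimum maximum best d) (PySem.Int.floordiv n d)
         else best) f
    else best

def find_fst_product_of_nbit_alt (n : Int) (nbit : Int) : Option (Int × Int) :=
  let minimum : Int := 10 ^ (nbit - 1).toNat
  let maximum : Int := 10 ^ nbit.toNat - 1
  if n ≤ 0 then none
  else
    match pvLoop n minimum maximum 1 none (n.toNat + 1) with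
    | none => none
    | some b => some (b, PySem.Int.floordiv n b)

-- ===== PRECONDITION & SPEC =====
-- A raises ValueError (int("") on the empty digit string) exactly when nbit ≤ 0.
def Pre_find_fst_product_of_nbit (n : Int) (nbit : Int) : Prop := 1 ≤ nbit
instance (n : Int) (nbit : Int) : Decidable (Pre_find_fst_product_of_nbit n nbit) := by unfold Pre_find_fst_product_of_nbit; infer_instance
def pvWitness_find_fst_product_of_nbit : Int × Int := (6, 1)

def Spec_find_fst_product_of_nbit (n : Int) (nbit : Int) (out : Option (Int × Int)) : Prop := out = find_fst_product_of_nbit_alt n nbit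
instance (n : Int) (nbit : Int) (out : Option (Int × Int)) : Decidable (Spec_find_fst_product_of_nbit n nbit out) := by unfold Spec_find_fst_product_of_nbit; infer_instance

-- ===== CLAIM (what is proved, stated in full; the proofs are below) =====
def Claim_equal_find_fst_product_of_nbit : Prop := ∀ (n : Int) (nbit : Int), Dom_find_fst_product_of_nbit n nbit → Pre_find_fst_product_of_nbit n nbit → Spec_find_fst_product_of_nbit n nbit (find_fst_product_of_nbit n nbit)
-- ===== LEMMAS AND PROOFS =====

-- values of the digit strings A feeds to int()
lemma pvFoldZeros (k : Nat) (a : Int) :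
    (List.replicate k '0').foldl (fun a c => a * 10 + ((c.toNat : Int) - 48)) a = a * 10 ^ k := by
  induction k generalizing a with
  | zero => simp
  | succ k ih =>
      rw [List.replicate_succ, List.foldl_cons, ih]
      have h : (('0'.toNat : Nat) : Int) = 48 := by decide
      rw [h, pow_succ]; ring

lemma pvFoldNines (k : Nat) (a : Int) :
    (List.replicate k '9').foldl (fun a c => a * 10 + ((c.toNat : Int) - 48)) a = a * 10 ^ k + (10 ^ k - 1) := by
  induction k generalizing a with
  | zero => simp
  | succ k ih =>
      rw [List.replicate_succ, List.foldl_cons, ih]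
      have h : (('9'.toNat : Nat) : Int) = 57 := by decide
      rw [h, pow_succ]; ring

lemma pvMinVal (k : Nat) : pvIntOfDigits? ('1' :: List.replicate k '0') = some (10 ^ k) := by
  unfold pvIntOfDigits?
  rw [if_pos]
  · rw [List.foldl_cons]
    have h : (('1'.toNat : Nat) : Int) = 49 := by decide
    rw [h, pvFoldZeros]; norm_num
  · refine ⟨by simp, ?_⟩
    simp [List.all_replicate]

lemma pvMaxVal (k : Nat) : pvIntOfDigits? (List.replicate (k + 1) '9') = some (10 ^ (k + 1) - 1) := by
  unfold pvIntOfDigits?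
  rw [if_pos]
  · rw [pvFoldNines]; norm_num
  · refine ⟨by simp, ?_⟩
    simp [List.all_replicate]

-- the first hit of a for-loop with early return over range(a,b)
lemma pvFindSome_some {β : Type} (f : Int → Option β) (a b : Int) (x : β)
    (h : (PySem.List.pyRange a b 1).findSome? f = some x) :
    ∃ i, a ≤ i ∧ i < b ∧ f i = some x ∧ ∀ j, a ≤ j → j < i → f j = none := by
  by_cases hab : a < b
  · rw [PySem.List.pyRange_one_cons hab, List.findSome?_cons] at h
    cases hfa : f a with
    | some y =>
        rw [hfa] at h
        exact ⟨a, le_rfl, hab, by simp_all, fun j h1 h2 => by omega⟩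
    | none =>
        rw [hfa] at h
        have : (b - (a+1)).toNat < (b - a).toNat := by omega
        obtain ⟨i, h1, h2, h3, h4⟩ := pvFindSome_some f (a+1) b x h
        refine ⟨i, by omega, h2, h3, fun j hj1 hj2 => ?_⟩
        by_cases hj : j = a
        · subst hj; exact hfa
        · exact h4 j (by omega) hj2
  · rw [PySem.List.pyRange_one_eq_nil (by omega), List.findSome?_nil] at h
    exact absurd h (by simp)
termination_by (b - a).toNat

-- the common specification: the least in-range divisor of n with in-range cofactor
def pvCand (n m M c : Int) : Prop :=
  m ≤ c ∧ c ≤ M ∧ PySem.Int.mod n c = 0 ∧ m ≤ PySem.Int.floordiv n c ∧ PySem.Int.floordiv n c ≤ M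

def pvBestP (n m M : Int) (r : Option Int) : Prop :=
  (∀ b, r = some b → pvCand n m M b) ∧ (∀ c, pvCand n m M c → ∃ b, r = some b ∧ b ≤ c)

lemma pvBestP_unique {n m M : Int} {r r' : Option Int}
    (h : pvBestP n m M r) (h' : pvBestP n m M r') : r = r' := by
  obtain ⟨hc, hl⟩ := h
  obtain ⟨hc', hl'⟩ := h'
  cases r with
  | none =>
      cases r' with
      | none => rfl
      | some b' =>
          obtain ⟨b, hb, _⟩ := hl b' (hc' b' rfl)
          exact absurd hb (by simp)
  | some b =>
      obtain ⟨b', hb', hle'⟩ := hl' b (hc b rfl)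
      obtain ⟨b'', hb'', hle''⟩ := hl b' (hc' b' hb')
      rw [hb']
      simp only [Option.some.injEq] at hb'' ⊢
      omega

lemma pvCand_pos {n m M c : Int} (hm : 1 ≤ m) (hc : pvCand n m M c) : 1 ≤ n := by
  obtain ⟨h1, _, _, h4, _⟩ := hc
  have hc0 : 0 < c := by omega
  have := (PySem.Int.le_floordiv_iff_mul_le (a := n) (b := c) (q := m) hc0).mp h4
  nlinarith

lemma pvA_char (n m M : Int) (hm : 1 ≤ m) :
    ∃ r, pvBestP n m M r ∧
      (PySem.List.pyRange m (M + 1) 1).findSome? (fun i =>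
        if PySem.Int.mod n i = 0 then
          let q := PySem.Int.floordiv n i
          if m ≤ q ∧ q < M + 1 then some (i, q) else none
        else none) = r.map (fun b => (b, PySem.Int.floordiv n b)) := by
  set f : Int → Option (Int × Int) := fun i =>
        if PySem.Int.mod n i = 0 then
          let q := PySem.Int.floordiv n i
          if m ≤ q ∧ q < M + 1 then some (i, q) else none
        else none with hf
  have hfc : ∀ c, pvCand n m M c → f c = some (c, PySem.Int.floordiv n c) := by
    intro c hc
    obtain ⟨h1, h2, h3, h4, h5⟩ := hc
    simp only [hf, h3, if_pos]
    rw [if_pos (by omega)]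
  cases h : (PySem.List.pyRange m (M + 1) 1).findSome? f with
  | none =>
      refine ⟨none, ⟨by simp, fun c hc => ?_⟩, by simp [h]⟩
      have hmem : c ∈ PySem.List.pyRange m (M + 1) 1 := by
        rw [PySem.List.mem_pyRange_one]
        obtain ⟨h1, h2, _⟩ := hc
        omega
      have := List.findSome?_eq_none_iff.mp h c hmem
      rw [hfc c hc] at this
      exact absurd this (by simp)
  | some x =>
      obtain ⟨i, h1, h2, h3, h4⟩ := pvFindSome_some f m (M + 1) x h
      have hx : x = (i, PySem.Int.floordiv n i) ∧ PySem.Int.mod n i = 0 ∧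
          m ≤ PySem.Int.floordiv n i ∧ PySem.Int.floordiv n i ≤ M := by
        simp only [hf] at h3
        split_ifs at h3 with hmod hq
        · exact ⟨(Option.some.inj h3).symm, hmod, by omega⟩
      have hcandi : pvCand n m M i := ⟨h1, by omega, hx.2.1, hx.2.2.1, hx.2.2.2⟩
      refine ⟨some i, ⟨fun b hb => by simp_all, fun c hc => ⟨i, rfl, ?_⟩⟩, by simp [h, hx.1]⟩
      by_contra hlt
      push_neg at hlt
      have := h4 c hc.1 hlt
      rw [hfc c hc] at this
      exact absurd this (by simp)

def pvSmall (n c : Int) : Int := if c * c ≤ n then c else PySem.Int.floordiv n c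

lemma pvBest_keeps {n m M : Int} {best : Option Int} {b c : Int} (h : best = some b) :
    ∃ b', pvBest n m M best c = some b' ∧ b' ≤ b := by
  unfold pvBest
  subst h
  split_ifs with hcond
  · by_cases hcb : c < b
    · exact ⟨c, by simp [hcb], by omega⟩
    · exact ⟨b, by simp [hcb], le_rfl⟩
  · exact ⟨b, rfl, le_rfl⟩

lemma pvBest_cand {n m M : Int} {best : Option Int} {c : Int}
    (hdvd : PySem.Int.mod n c = 0)
    (hbest : ∀ b, best = some b → pvCand n m M b) :
    ∀ b', pvBest n m M best c = some b' → pvCand n m M b' := by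
  intro b' hb'
  unfold pvBest at hb'
  split_ifs at hb' with hcond
  · cases best with
    | none =>
        have : b' = c := (Option.some.inj hb').symm
        subst this
        exact ⟨hcond.1, hcond.2.1, hdvd, hcond.2.2⟩
    | some b =>
        have hb'' : (if c < b then some c else some b) = some b' := hb'
        by_cases hcb : c < b
        · rw [if_pos hcb] at hb''
          have : b' = c := (Option.some.inj hb'').symm
          subst this
          exact ⟨hcond.1, hcond.2.1, hdvd, hcond.2.2⟩
        · rw [if_neg hcb] at hb''
          have : b' = b := (Option.some.inj hb'').symm
          subst this
          exact hbest b' rfl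
  · exact hbest b' hb'

lemma pvBest_hits {n m M : Int} {best : Option Int} {c : Int} (hc : pvCand n m M c) :
    ∃ b', pvBest n m M best c = some b' ∧ b' ≤ c := by
  obtain ⟨h1, h2, _, h4, h5⟩ := hc
  unfold pvBest
  rw [if_pos ⟨h1, h2, h4, h5⟩]
  cases best with
  | none => exact ⟨c, rfl, le_rfl⟩
  | some b =>
      by_cases hcb : c < b
      · exact ⟨c, by simp [hcb], le_rfl⟩
      · exact ⟨b, by simp [hcb], by omega⟩
lemma pvCand_dvd {n m M c : Int} (hm : 1 ≤ m) (hc : pvCand n m M c) :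
    c ∣ n ∧ 1 ≤ c ∧ PySem.Int.floordiv n c * c = n ∧ 1 ≤ PySem.Int.floordiv n c := by
  obtain ⟨h1, h2, h3, h4, h5⟩ := hc
  have hc0 : (0:Int) < c := by omega
  have hdvd : c ∣ n := (PySem.Int.mod_eq_zero_iff_dvd n c).mp h3
  refine ⟨hdvd, by omega, ?_, by omega⟩
  rw [PySem.Int.floordiv_eq_ediv_of_pos hc0]
  exact Int.ediv_mul_cancel hdvd

lemma pvSmall_facts {n m M c : Int} (hm : 1 ≤ m) (hn : 1 ≤ n) (hc : pvCand n m M c) :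
    1 ≤ pvSmall n c ∧ pvSmall n c * pvSmall n c ≤ n := by
  obtain ⟨hdvd, hc1, heq, hq1⟩ := pvCand_dvd hm hc
  unfold pvSmall
  split_ifs with h
  · exact ⟨hc1, h⟩
  · exact ⟨hq1, by nlinarith⟩

lemma pvSmall_hit {n m M c d : Int} (hm : 1 ≤ m) (hc : pvCand n m M c)
    (hd : pvSmall n c = d) :
    PySem.Int.mod n d = 0 ∧ (c = d ∨ PySem.Int.floordiv n d = c) := by
  obtain ⟨hdvd, hc1, heq, hq1⟩ := pvCand_dvd hm hc
  unfold pvSmall at hd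
  split_ifs at hd with h
  · subst hd; exact ⟨hc.2.2.1, Or.inl rfl⟩
  · subst hd
    have hqdvd : PySem.Int.floordiv n c ∣ n := ⟨c, heq.symm⟩
    refine ⟨(PySem.Int.mod_eq_zero_iff_dvd _ _).mpr hqdvd, Or.inr ?_⟩
    rw [PySem.Int.floordiv_eq_ediv_of_pos (by omega)]
    calc n / PySem.Int.floordiv n c = (PySem.Int.floordiv n c * c) / PySem.Int.floordiv n c := by rw [heq]
      _ = c := Int.mul_ediv_cancel_left _ (by omega)

lemma pvLoop_inv (n m M : Int) (hm : 1 ≤ m) (hn : 1 ≤ n) :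
    ∀ (fuel : Nat) (d : Int) (best : Option Int),
      1 ≤ d → (n + 1 : Int) ≤ d + fuel →
      (∀ b, best = some b → pvCand n m M b) →
      (∀ c, pvCand n m M c → pvSmall n c < d → ∃ b, best = some b ∧ b ≤ c) →
      pvBestP n m M (pvLoop n m M d best fuel) := by
  intro fuel
  induction fuel with
  | zero =>
      intro d best hd hfuel hbest hmin
      refine ⟨hbest, fun c hc => hmin c hc ?_⟩
      obtain ⟨hs1, hs2⟩ := pvSmall_facts hm hn hc
      push_cast at hfuel
      nlinarith
  | succ f ih =>
      intro d best hd hfuel hbest hmin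
      unfold pvLoop
      by_cases hguard : d * d ≤ n
      · rw [if_pos hguard]
        apply ih (d + 1)
        · omega
        · push_cast at hfuel ⊢; omega
        · intro b hb
          by_cases hdv : PySem.Int.mod n d = 0
          · rw [if_pos hdv] at hb
            refine pvBest_cand ?_ (pvBest_cand hdv hbest) b hb
            have hdvd : d ∣ n := (PySem.Int.mod_eq_zero_iff_dvd n d).mp hdv
            rw [PySem.Int.floordiv_eq_ediv_of_pos (by omega)]
            exact (PySem.Int.mod_eq_zero_iff_dvd _ _).mpr ⟨d, (Int.ediv_mul_cancel hdvd).symm⟩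
          · rw [if_neg hdv] at hb
            exact hbest b hb
        · intro c hc hsm
          by_cases hlt : pvSmall n c < d
          · obtain ⟨b, hb, hble⟩ := hmin c hc hlt
            by_cases hdv : PySem.Int.mod n d = 0
            · rw [if_pos hdv]
              obtain ⟨b1, hb1, hle1⟩ := pvBest_keeps (n := n) (m := m) (M := M) (c := d) hb
              obtain ⟨b2, hb2, hle2⟩ := pvBest_keeps (n := n) (m := m) (M := M) (c := PySem.Int.floordiv n d) hb1
              exact ⟨b2, hb2, by omega⟩
            · rw [if_neg hdv]
              exact ⟨b, hb, hble⟩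
          · have hsd : pvSmall n c = d := by omega
            obtain ⟨hdv, hcases⟩ := pvSmall_hit hm hc hsd
            rw [if_pos hdv]
            rcases hcases with hcd | hq
            · subst hcd
              obtain ⟨b1, hb1, hle1⟩ := pvBest_hits (best := best) hc
              obtain ⟨b2, hb2, hle2⟩ := pvBest_keeps (n := n) (m := m) (M := M) (c := PySem.Int.floordiv n c) hb1
              exact ⟨b2, hb2, by omega⟩
            · rw [hq]
              exact pvBest_hits hc
      · rw [if_neg hguard]
        refine ⟨hbest, fun c hc => hmin c hc ?_⟩
        obtain ⟨hs1, hs2⟩ := pvSmall_facts hm hn hc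
        nlinarith

lemma pvB_char (n m M : Int) (hm : 1 ≤ m) (hn : 1 ≤ n) :
    pvBestP n m M (pvLoop n m M 1 none (n.toNat + 1)) := by
  apply pvLoop_inv n m M hm hn (n.toNat + 1) 1 none (by omega) (by push_cast; omega) (by simp)
  intro c hc hlt
  have := (pvSmall_facts hm hn hc).1
  omega

-- ===== VERDICT (by name: the statement is the Claim_ definition above) =====
theorem find_fst_product_of_nbit_spec : Claim_equal_find_fst_product_of_nbit := by
  intro n nbit _ hpre
  unfold Pre_find_fst_product_of_nbit at hpre
  unfold Spec_find_fst_product_of_nbit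
  have hk1 : nbit.toNat = (nbit - 1).toNat + 1 := by omega
  set k := (nbit - 1).toNat with hk
  have hm : (1:Int) ≤ 10 ^ k := one_le_pow₀ (by norm_num)
  have hA : find_fst_product_of_nbit n nbit =
      (PySem.List.pyRange (10 ^ k) ((10 ^ (k+1) - 1) + 1) 1).findSome? (fun i =>
        if PySem.Int.mod n i = 0 then
          let q := PySem.Int.floordiv n i
          if (10:Int) ^ k ≤ q ∧ q < (10 ^ (k+1) - 1) + 1 then some (i, q) else none
        else none) := by
    unfold find_fst_product_of_nbit
    rw [hk1, ← hk, pvMinVal, pvMaxVal]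
  obtain ⟨r, hr, heq⟩ := pvA_char n (10 ^ k) (10 ^ (k+1) - 1) hm
  rw [hA, heq]
  unfold find_fst_product_of_nbit_alt
  by_cases hn : n ≤ 0
  · rw [if_pos hn]
    have hrnone : r = none := by
      cases hrr : r with
      | none => rfl
      | some b => exact absurd (pvCand_pos hm (hr.1 b hrr)) (by omega)
    rw [hrnone]; rfl
  · rw [if_neg hn]
    have hB := pvB_char n (10 ^ k) (10 ^ (k+1) - 1) hm (by omega)
    rw [hk1, ← hk]
    have := pvBestP_unique hr hB
    rw [← this]
    cases r with
    | none => rfl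
    | some b => rfl
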